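-- pv_equiv track=rewrite | github.com/httppsdouq29/TT_ATTT | bai25.py | find_sum_of_primes
-- ===== SOURCE A (Python) =====
-- def find_sum_of_primes(primes, target, count): #target = N count = M
--     """Tìm M số nguyên tố có tổng bằng N."""
--     def backtrack(start, current_sum, path): # start = 0 , curSum= 0 , path = []
--         if len(path) == count:
--             if current_sum == target:
--                 return path
--             return None # None là dừng lại nhánh này
--         if current_sum > target or len(path) > count:
--             return None
--
--         for i in range(start, len(primes)):
--             result = backtrack(i + 1, current_sum + primes[i], path + [primes[i]])
--             #i + 1 làm vị trí bắt đầu mới (để không lặp lại số nguyên tố hiện tại).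
--             #Current_sum + primes[i] là tổng mới sau khi thêm số nguyên tố primes[i].
--             #path + [primes[i]] là danh sách mới sau khi thêm số nguyên tố primes[i].
--             if result:
--                 return result
--         return None
--
--     return backtrack(0, 0, [])
-- ===== SOURCE B (Python) =====
-- def find_sum_of_primes(primes, target, count):
--     """Tim M so nguyen to co tong bang N (DP over suffixes + greedy reconstruction)."""
--     n = len(primes)
--     if count < 0 or count > n:
--         return None
--     m = count
--     # table[start][j] = set of sums s reachable by picking j elements with indices >= start,
--     # respecting A's prefix pruning (every intermediate remaining sum is >= 0).
--     table = [None] * (n + 1)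
--     table[n] = [{0}] + [set() for _ in range(m)]
--     for start in range(n - 1, -1, -1):
--         p = primes[start]
--         nxt = table[start + 1]
--         row = [{0}]
--         for j in range(1, m + 1):
--             row.append(nxt[j] | {p + t for t in nxt[j - 1] if p + t >= 0})
--         table[start] = row
--     if target not in table[0][m]:
--         return None
--     # greedy reconstruction of the lexicographically-first index choice
--     path = []
--     start, rem, j = 0, target, m
--     while j > 0:
--         while rem - primes[start] not in table[start + 1][j - 1]:
--             start += 1
--         path.append(primes[start])
--         rem -= primes[start]
--         start += 1
--         j -= 1
--     return path
-- ===== Notes on version B (the rewrite author's own statement) =====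
-- stated objective: alternative
-- what changed: Replaces A's depth-first backtracking over index combinations by a bottom-up suffix DP that tabulates, for every start index and pick-count j, the set of reachable remaining sums, followed by a greedy left-to-right reconstruction of the lexicographically-first solution; the DP is much faster when reachable-sum sets stay small but can be slower or memory-heavy when subset sums are all distinct, so no speed is claimed.
import Mathlib
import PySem

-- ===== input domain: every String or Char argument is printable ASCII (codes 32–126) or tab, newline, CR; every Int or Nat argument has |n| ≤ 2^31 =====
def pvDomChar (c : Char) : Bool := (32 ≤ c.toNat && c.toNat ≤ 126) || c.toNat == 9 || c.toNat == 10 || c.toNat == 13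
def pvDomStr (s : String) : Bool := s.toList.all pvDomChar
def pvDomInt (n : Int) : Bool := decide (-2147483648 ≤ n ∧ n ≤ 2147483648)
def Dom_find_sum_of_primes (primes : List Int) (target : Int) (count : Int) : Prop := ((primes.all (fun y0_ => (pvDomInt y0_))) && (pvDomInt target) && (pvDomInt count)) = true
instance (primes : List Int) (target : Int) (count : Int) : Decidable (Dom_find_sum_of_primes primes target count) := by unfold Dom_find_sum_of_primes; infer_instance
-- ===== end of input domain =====

-- B replaces A's depth-first backtracking by a suffix DP of feasible-sum sets plus a greedy
-- lexicographic reconstruction (objective: alternative algorithm, same exact result).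

-- ===== PORT A =====
-- backtrack(start, current_sum, path): the suffix primes[start:] is passed as the list `l`.
mutual
def pvBtA (target count : Int) (l : List Int) (cs : Int) (path : List Int) : Option (List Int) :=
  if (path.length : Int) = count then
    (if cs = target then some path else none)
  else if cs > target ∨ (path.length : Int) > count then none
  else pvLoopA target count l cs path
  termination_by (l.length, 1)

-- the `for i in range(start, len(primes))` loop with its early return (`if result:` is
-- Python truthiness: an empty list result falls through)
def pvLoopA (target count : Int) (l : List Int) (cs : Int) (path : List Int) : Option (List Int) :=
  match l with
  | [] => none
  | p :: rest =>
    match pvBtA target count rest (cs + p) (path ++ [p]) with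
    | some r => if r.isEmpty then pvLoopA target count rest cs path else some r
    | none => pvLoopA target count rest cs path
  termination_by (l.length, 0)
end

def find_sum_of_primes (primes : List Int) (target : Int) (count : Int) : Option (List Int) :=
  pvBtA target count primes 0 []

-- ===== PORT B =====
-- row construction: row[0] = {0}; row[j] = nxt[j] | {p + t for t in nxt[j-1] if p + t >= 0}
def pvBuildRow (m : Nat) (p : Int) (nxt : List (PySem.Set Int)) : List (PySem.Set Int) :=
  PySem.Set.ofList [0] ::
    (List.range' 1 m).map (fun j =>
      PySem.Set.union (nxt.getD j PySem.Set.empty)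
        (PySem.Set.ofList
          (((nxt.getD (j - 1) PySem.Set.empty).filter (fun t => decide (0 ≤ p + t))).map
            (fun t => p + t))))

-- the table rows for primes[start:], built from start = n down (Python's reversed range loop);
-- pvRows m l = [table[start], table[start+1], …, table[n]] where l = primes[start:]
def pvRows (m : Nat) : List Int → List (List (PySem.Set Int))
  | [] => [PySem.Set.ofList [0] :: List.replicate m PySem.Set.empty]
  | p :: rest => pvBuildRow m p ((pvRows m rest).headD []) :: pvRows m rest

-- the two reconstruction while-loops fused into one scan over the suffix (start advances by one
-- each step, taking primes[start] exactly when rem - primes[start] ∈ table[start+1][j-1])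
def pvRecB : List Int → List (List (PySem.Set Int)) → Int → Nat → List Int → List Int
  | _, _, _, 0, path => path
  | [], _, _, _ + 1, path => path
  | p :: rest, rs, rem, j + 1, path =>
    if ((rs.drop 1).headD []).getD j PySem.Set.empty |>.contains (rem - p) then
      pvRecB rest (rs.drop 1) (rem - p) j (path ++ [p])
    else
      pvRecB rest (rs.drop 1) rem (j + 1) path

def find_sum_of_primes_alt (primes : List Int) (target : Int) (count : Int) : Option (List Int) :=
  if count < 0 ∨ (primes.length : Int) < count then none
  else
    let m := count.toNat
    let rows := pvRows m primes
    if ((rows.headD []).getD m PySem.Set.empty).contains target then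
      some (pvRecB primes rows target m [])
    else none

-- ===== PRECONDITION & SPEC =====
def Spec_find_sum_of_primes (primes : List Int) (target : Int) (count : Int) (out : Option (List Int)) : Prop := out = find_sum_of_primes_alt primes target count
instance (primes : List Int) (target : Int) (count : Int) (out : Option (List Int)) : Decidable (Spec_find_sum_of_primes primes target count out) := by unfold Spec_find_sum_of_primes; infer_instance

-- ===== CLAIM (what is proved, stated in full; the proofs are below) =====
def Claim_equal_find_sum_of_primes : Prop := ∀ (primes : List Int) (target : Int) (count : Int), Dom_find_sum_of_primes primes target count → Spec_find_sum_of_primes primes target count (find_sum_of_primes primes target count)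

-- ===== LEMMAS AND PROOFS =====

-- feasibility of A's search from a node: pvFeas l s j ↔ picking j elements of l in order can
-- reach remaining sum 0, with every intermediate remaining sum ≥ 0 (A's pruning)
def pvFeas : List Int → Int → Nat → Bool
  | _, s, 0 => s == 0
  | [], _, _ + 1 => false
  | p :: rest, s, j + 1 => decide (0 ≤ s) && (pvFeas rest (s - p) j || pvFeas rest s (j + 1))

-- the path A's depth-first search returns, characterised greedily
def pvGreedy : List Int → Int → Nat → List Int
  | _, _, 0 => []
  | [], _, _ + 1 => []
  | p :: rest, s, j + 1 =>
    if pvFeas rest (s - p) j then p :: pvGreedy rest (s - p) j else pvGreedy rest s (j + 1)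

theorem pvFeas_nonneg (l : List Int) (s : Int) (j : Nat) (h : pvFeas l s (j + 1) = true) : 0 ≤ s := by
  cases l with
  | nil => simp [pvFeas] at h
  | cons p rest => simp [pvFeas] at h; exact h.1

theorem pvFeas_le_length (l : List Int) (s : Int) (j : Nat) (h : pvFeas l s j = true) : j ≤ l.length := by
  induction l generalizing s j with
  | nil => cases j with
    | zero => simp
    | succ j => simp [pvFeas] at h
  | cons p rest ih =>
    cases j with
    | zero => simp
    | succ j =>
      simp only [pvFeas, Bool.and_eq_true, Bool.or_eq_true] at h
      rcases h.2 with h2 | h2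
      · have := ih _ _ h2; simp; omega
      · have := ih _ _ h2; simp; omega

theorem pvA_char (target count : Int) (l : List Int) :
    (∀ (cs : Int) (path : List Int) (j : Nat),
      (path.length : Int) + (j + 1) = count → 0 ≤ target - cs →
      pvLoopA target count l cs path =
        if pvFeas l (target - cs) (j + 1) then some (path ++ pvGreedy l (target - cs) (j + 1)) else none) ∧
    (∀ (cs : Int) (path : List Int) (j : Nat),
      (path.length : Int) + j = count →
      pvBtA target count l cs path =
        if pvFeas l (target - cs) j then some (path ++ pvGreedy l (target - cs) j) else none) := by
  induction l with
  | nil =>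
    have hloop : ∀ (cs : Int) (path : List Int) (j : Nat),
        (path.length : Int) + (j + 1) = count → 0 ≤ target - cs →
        pvLoopA target count [] cs path =
          if pvFeas [] (target - cs) (j + 1) then some (path ++ pvGreedy [] (target - cs) (j + 1)) else none := by
      intro cs path j hj hs
      simp [pvLoopA, pvFeas]
    refine ⟨hloop, ?_⟩
    intro cs path j hj
    cases j with
    | zero =>
      rw [pvBtA]
      have hlen : (path.length : Int) = count := by omega
      simp only [hlen, if_pos]
      by_cases hcs : cs = target
      · simp [hcs, pvFeas, pvGreedy]
      · have : ¬ (target - cs = 0) := by omega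
        simp [pvFeas, hcs, this]
    | succ j =>
      rw [pvBtA]
      have hlen : ¬ ((path.length : Int) = count) := by omega
      rw [if_neg hlen]
      by_cases hcs : cs > target
      · have hcond : cs > target ∨ (path.length : Int) > count := Or.inl hcs
        rw [if_pos hcond]
        have : ¬ (pvFeas [] (target - cs) (j + 1) = true) := by simp [pvFeas]
        simp [this]
      · have hcond : ¬ (cs > target ∨ (path.length : Int) > count) := by
          simp only [not_or]; constructor <;> omega
        rw [if_neg hcond]
        exact hloop cs path j hj (by omega)
  | cons p rest ih =>
    have hloop : ∀ (cs : Int) (path : List Int) (j : Nat),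
        (path.length : Int) + (j + 1) = count → 0 ≤ target - cs →
        pvLoopA target count (p :: rest) cs path =
          if pvFeas (p :: rest) (target - cs) (j + 1) then
            some (path ++ pvGreedy (p :: rest) (target - cs) (j + 1)) else none := by
      intro cs path j hj hs
      rw [pvLoopA]
      have hbt := ih.2 (cs + p) (path ++ [p]) j (by simp; omega)
      have harg : target - (cs + p) = target - cs - p := by ring
      rw [harg] at hbt
      by_cases hsub : pvFeas rest (target - cs - p) j = true
      · rw [hbt, if_pos hsub]
        have hne : ((path ++ [p]) ++ pvGreedy rest (target - cs - p) j).isEmpty = false := by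
          simp
        simp only [hne]
        have hfeas : pvFeas (p :: rest) (target - cs) (j + 1) = true := by
          simp only [pvFeas, Bool.and_eq_true, Bool.or_eq_true, decide_eq_true_eq]
          exact ⟨hs, Or.inl hsub⟩
        rw [if_pos hfeas]
        simp [pvGreedy, hsub]
      · rw [hbt, if_neg hsub]
        rw [ih.1 cs path j hj hs]
        rw [Bool.not_eq_true] at hsub
        have hfeq : pvFeas (p :: rest) (target - cs) (j + 1) = pvFeas rest (target - cs) (j + 1) := by
          simp [pvFeas, hsub]
          intro _
          omega
        rw [hfeq]
        by_cases hfr : pvFeas rest (target - cs) (j + 1) = true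
        · rw [if_pos hfr, if_pos hfr]
          have hg : pvGreedy (p :: rest) (target - cs) (j + 1) = pvGreedy rest (target - cs) (j + 1) := by
            simp [pvGreedy, hsub]
          rw [hg]
        · simp [hfr]
    refine ⟨hloop, ?_⟩
    intro cs path j hj
    cases j with
    | zero =>
      rw [pvBtA]
      have hlen : (path.length : Int) = count := by omega
      simp only [hlen, if_pos]
      by_cases hcs : cs = target
      · simp [hcs, pvFeas, pvGreedy]
      · have : ¬ (target - cs = 0) := by omega
        simp [pvFeas, hcs, this]
    | succ j =>
      rw [pvBtA]
      have hlen : ¬ ((path.length : Int) = count) := by omega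
      rw [if_neg hlen]
      by_cases hcs : cs > target
      · have hcond : cs > target ∨ (path.length : Int) > count := Or.inl hcs
        rw [if_pos hcond]
        have : ¬ (pvFeas (p :: rest) (target - cs) (j + 1) = true) := by
          intro hc; have := pvFeas_nonneg _ _ _ hc; omega
        simp [this]
      · have hcond : ¬ (cs > target ∨ (path.length : Int) > count) := by
          simp only [not_or]; constructor <;> omega
        rw [if_neg hcond]
        exact hloop cs path j hj (by omega)

-- the head row of pvRows characterises pvFeas
theorem pvRows_mem (m : Nat) (l : List Int) (j : Nat) (s : Int) (hj : j ≤ m) :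
    s ∈ ((pvRows m l).headD []).getD j PySem.Set.empty ↔ pvFeas l s j = true := by
  induction l generalizing j s with
  | nil =>
    cases j with
    | zero => simp [pvRows, pvFeas, PySem.Set.mem_ofList]
    | succ j =>
      have hlt : j < m := by omega
      simp only [pvRows, List.headD, List.getD_cons_succ]
      rw [List.getD_eq_getElem?_getD, List.getElem?_replicate]
      simp [hlt, pvFeas, PySem.Set.empty]
  | cons p rest ih =>
    cases j with
    | zero => simp [pvRows, pvBuildRow, pvFeas, PySem.Set.mem_ofList]
    | succ j =>
      have hlt : j < m := by omega
      have hd : ((pvRows m (p :: rest)).headD []) = pvBuildRow m p ((pvRows m rest).headD []) := rfl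
      rw [hd]
      simp only [pvBuildRow, List.getD_cons_succ]
      rw [List.getD_eq_getElem?_getD, List.getElem?_map]
      have hr : (List.range' 1 m)[j]? = some (1 + j) := by
        simp [hlt]
      rw [hr]
      simp only [Option.map_some, Option.getD_some]
      rw [PySem.Set.mem_union]
      have h1 : (1 + j : Nat) - 1 = j := by omega
      rw [h1]
      rw [PySem.Set.mem_ofList]
      simp only [List.mem_map, List.mem_filter, decide_eq_true_eq]
      constructor
      · rintro (h | ⟨t, ⟨ht, hpt⟩, rfl⟩)
        · have hf : pvFeas rest s (1 + j) = true := (ih (1 + j) s (by omega)).1 h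
          have h1j : 1 + j = j + 1 := by omega
          rw [h1j] at hf
          have hs : 0 ≤ s := pvFeas_nonneg _ _ _ hf
          simp only [pvFeas, Bool.and_eq_true, Bool.or_eq_true, decide_eq_true_eq]
          exact ⟨hs, Or.inr hf⟩
        · have hf : pvFeas rest (p + t - p) j = true := by
            have := (ih j (p + t - p) (by omega)).1 (by simpa using ht)
            exact this
          simp only [pvFeas, Bool.and_eq_true, Bool.or_eq_true, decide_eq_true_eq]
          refine ⟨hpt, Or.inl ?_⟩
          simpa using hf
      · intro hf
        simp only [pvFeas, Bool.and_eq_true, Bool.or_eq_true, decide_eq_true_eq] at hf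
        rcases hf.2 with h2 | h2
        · right
          refine ⟨s - p, ⟨?_, by omega⟩, by ring⟩
          exact (ih j (s - p) (by omega)).2 h2
        · left
          have h1j : (1 : Nat) + j = j + 1 := by omega
          rw [h1j]
          exact (ih (j + 1) s (by omega)).2 h2

theorem pvRecB_eq_greedy (m : Nat) (l : List Int) (rem : Int) (j : Nat) (path : List Int)
    (hj : j ≤ m) (hf : pvFeas l rem j = true) :
    pvRecB l (pvRows m l) rem j path = path ++ pvGreedy l rem j := by
  induction l generalizing rem j path with
  | nil =>
    cases j with
    | zero => simp [pvRecB, pvGreedy]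
    | succ j => simp [pvFeas] at hf
  | cons p rest ih =>
    cases j with
    | zero => simp [pvRecB, pvGreedy]
    | succ j =>
      have hdrop : (pvRows m (p :: rest)).drop 1 = pvRows m rest := by
        simp [pvRows]
      rw [pvRecB, hdrop]
      have hcontains : (((pvRows m rest).headD []).getD j PySem.Set.empty).contains (rem - p)
          = pvFeas rest (rem - p) j := by
        cases hfr : pvFeas rest (rem - p) j with
        | true =>
          have := (pvRows_mem m rest j (rem - p) (by omega)).2 hfr
          simpa [PySem.Set.contains_iff] using this
        | false =>
          rw [Bool.eq_false_iff]
          intro hc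
          have := (pvRows_mem m rest j (rem - p) (by omega)).1 ((PySem.Set.contains_iff _ _).1 hc)
          rw [this] at hfr; cases hfr
      by_cases hsub : pvFeas rest (rem - p) j = true
      · rw [if_pos (by rw [hcontains]; exact hsub)]
        rw [ih (rem - p) j (path ++ [p]) (by omega) hsub]
        simp [pvGreedy, hsub]
      · rw [if_neg (by rw [hcontains]; simpa using hsub)]
        have hrest : pvFeas rest rem (j + 1) = true := by
          simp only [pvFeas, Bool.and_eq_true, Bool.or_eq_true] at hf
          rcases hf.2 with h | h
          · exact absurd h hsub
          · exact h
        rw [ih rem (j + 1) path hj hrest]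
        simp [pvGreedy, hsub]

-- ===== VERDICT (by name: the statement is the Claim_ definition above) =====
theorem find_sum_of_primes_spec : Claim_equal_find_sum_of_primes := by
  unfold Claim_equal_find_sum_of_primes
  intro primes target count _
  unfold Spec_find_sum_of_primes find_sum_of_primes find_sum_of_primes_alt
  by_cases hneg : count < 0
  · rw [if_pos (Or.inl hneg)]
    rw [pvBtA]
    have h1 : ¬ ((([] : List Int).length : Int) = count) := by simp; omega
    rw [if_neg h1, if_pos (Or.inr (by simp; omega))]
  · have hm : (count.toNat : Int) = count := by omega
    have hbt := (pvA_char target count primes).2 0 [] count.toNat (by simp [hm])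
    have harg : target - 0 = target := by ring
    rw [harg] at hbt
    by_cases hbig : (primes.length : Int) < count
    · rw [if_pos (Or.inr hbig)]
      have : ¬ (pvFeas primes target count.toNat = true) := by
        intro hc
        have := pvFeas_le_length _ _ _ hc
        omega
      rw [hbt, if_neg this]
    · rw [if_neg (by simp only [not_or]; constructor <;> omega)]
      simp only []
      by_cases hfeas : pvFeas primes target count.toNat = true
      · have hcont : (((pvRows count.toNat primes).headD []).getD count.toNat PySem.Set.empty).contains target = true := by
          rw [PySem.Set.contains_iff]
          exact (pvRows_mem count.toNat primes count.toNat target (le_refl _)).2 hfeas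
        rw [if_pos hcont, hbt, if_pos hfeas]
        rw [pvRecB_eq_greedy count.toNat primes target count.toNat [] (le_refl _) hfeas]
      · have hcont : ¬ ((((pvRows count.toNat primes).headD []).getD count.toNat PySem.Set.empty).contains target = true) := by
          intro hc
          exact hfeas ((pvRows_mem count.toNat primes count.toNat target (le_refl _)).1 ((PySem.Set.contains_iff _ _).1 hc))
        rw [if_neg hcont, hbt, if_neg hfeas]
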